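-- pv_equiv track=rewrite | github.com/Ridealist/CodingTest | CodingTest_문제풀이/구현/문자열재정렬.py | rearrange2
-- ===== SOURCE A (Python) =====
-- import bisect
--
-- def rearrange2(S):
--     string = []
--     sum_num = 0
--     for i in S:
--         if 65 <= ord(i) and 122 >= ord(i):
--             bisect.insort_left(string, i, key= lambda x: ord(x))
--         elif 48 <= ord(i) and 57 >= ord(i):
--             sum_num += int(i)
--     return "".join(string) + str(sum_num)
-- ===== SOURCE B (Python) =====
-- def rearrange2(S):
--     counts = [0] * 58
--     sum_num = 0
--     for i in S:
--         o = ord(i)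
--         if 65 <= o <= 122:
--             counts[o - 65] += 1
--         elif 48 <= o <= 57:
--             sum_num += o - 48
--     parts = []
--     for o in range(65, 123):
--         parts.append(chr(o) * counts[o - 65])
--     return "".join(parts) + str(sum_num)
-- ===== Notes on version B (the rewrite author's own statement) =====
-- stated objective: faster
-- what changed: Replaces bisect insertion-sort of the kept characters with a one-pass counting (bucket) sort over the 58 ord values 65..122, rebuilding the sorted string from the count table.
import Mathlib
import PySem

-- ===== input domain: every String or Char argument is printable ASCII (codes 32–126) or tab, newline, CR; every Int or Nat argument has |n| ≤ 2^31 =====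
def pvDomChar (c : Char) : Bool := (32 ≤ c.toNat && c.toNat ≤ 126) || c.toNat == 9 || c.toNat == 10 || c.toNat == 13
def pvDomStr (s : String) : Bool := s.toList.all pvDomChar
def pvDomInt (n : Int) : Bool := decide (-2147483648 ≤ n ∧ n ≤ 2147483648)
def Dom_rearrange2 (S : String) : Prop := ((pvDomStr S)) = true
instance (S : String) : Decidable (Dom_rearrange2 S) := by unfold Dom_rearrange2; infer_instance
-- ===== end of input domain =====

-- B replaces A's per-character bisect insertion sort with a one-pass counting (bucket) sort
-- over the 58 ord values 65..122; faster.

-- ===== PORT A =====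
-- bisect.insort_left(string, i, key=ord): insert i before the first element whose ord is ≥ ord i
def pvInsortLeft (l : List Char) (c : Char) : List Char :=
  match l with
  | [] => [c]
  | x :: xs => if x.toNat < c.toNat then x :: pvInsortLeft xs c else c :: x :: xs

-- one iteration of A's loop; int(i) on a digit char i is exactly (ord i - 48)
def pvStepA (st : List Char × Int) (i : Char) : List Char × Int :=
  if 65 ≤ i.toNat ∧ i.toNat ≤ 122 then (pvInsortLeft st.1 i, st.2)
  else if 48 ≤ i.toNat ∧ i.toNat ≤ 57 then (st.1, st.2 + ((i.toNat : Int) - 48))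
  else st

def rearrange2 (S : String) : String :=
  let st := S.toList.foldl pvStepA ([], 0)
  String.ofList st.1 ++ PySem.Int.toStr st.2

-- ===== PORT B =====
-- one iteration of B's loop: bump the bucket counts[ord i - 65], or add the digit value
def pvStepB (st : List Nat × Int) (i : Char) : List Nat × Int :=
  if 65 ≤ i.toNat ∧ i.toNat ≤ 122 then
    (st.1.set (i.toNat - 65) (st.1.getD (i.toNat - 65) 0 + 1), st.2)
  else if 48 ≤ i.toNat ∧ i.toNat ≤ 57 then (st.1, st.2 + ((i.toNat : Int) - 48))
  else st

def rearrange2_alt (S : String) : String :=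
  let st := S.toList.foldl pvStepB (List.replicate 58 0, 0)
  let parts := (PySem.List.pyRange 65 123 1).foldl
    (fun acc o => acc ++ List.replicate (st.1.getD (o.toNat - 65) 0) (Char.ofNat o.toNat)) []
  String.ofList parts ++ PySem.Int.toStr st.2

-- ===== PRECONDITION & SPEC =====
def Spec_rearrange2 (S : String) (out : String) : Prop := out = rearrange2_alt S
instance (S : String) (out : String) : Decidable (Spec_rearrange2 S out) := by unfold Spec_rearrange2; infer_instance

-- ===== CLAIM (what is proved, stated in full; the proofs are below) =====
def Claim_equal_rearrange2 : Prop := ∀ (S : String), Dom_rearrange2 S → Spec_rearrange2 S (rearrange2 S)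

-- ===== LEMMAS AND PROOFS =====

-- the order relation A keeps its list sorted by
abbrev pvR (a b : Char) : Prop := a.toNat ≤ b.toNat

theorem pv_toNat_inj {a b : Char} (h : a.toNat = b.toNat) : a = b := by
  apply Char.ext
  exact UInt32.toNat_inj.mp h

theorem pv_sum_eq (l : List Char) : ∀ (a1 : List Char) (a2 : List Nat) (s : Int),
    (l.foldl pvStepA (a1, s)).2 = (l.foldl pvStepB (a2, s)).2 := by
  induction l with
  | nil => intro a1 a2 s; rfl
  | cons i l ih =>
      intro a1 a2 s
      simp only [List.foldl_cons, pvStepA, pvStepB]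
      split_ifs <;> exact ih _ _ _

theorem pv_insort_eq (c : Char) (l : List Char) :
    pvInsortLeft l c = List.orderedInsert pvR c l := by
  induction l with
  | nil => rfl
  | cons x xs ih =>
      simp only [pvInsortLeft, List.orderedInsert_cons]
      rcases Nat.lt_or_ge x.toNat c.toNat with h | h
      · rw [if_pos h, if_neg (Nat.not_le.mpr h), ih]
      · rw [if_neg (Nat.not_lt.mpr h), if_pos h]

def pvKept (c : Char) : Bool := decide (65 ≤ c.toNat ∧ c.toNat ≤ 122)

theorem pv_permA (l : List Char) : ∀ (acc : List Char) (s : Int),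
    ((l.foldl pvStepA (acc, s)).1).Perm ((l.filter pvKept).reverse ++ acc) := by
  induction l with
  | nil => intro acc s; simp
  | cons i l ih =>
      intro acc s
      simp only [List.foldl_cons, pvStepA]
      by_cases h : 65 ≤ i.toNat ∧ i.toNat ≤ 122
      · rw [if_pos h]
        have h1 : (l.foldl pvStepA (pvInsortLeft acc i, s)).1.Perm
            ((l.filter pvKept).reverse ++ pvInsortLeft acc i) := ih _ _
        have h2 : (pvInsortLeft acc i).Perm (i :: acc) := by
          rw [pv_insort_eq]; exact List.perm_orderedInsert _ _ _
        have hf : (i :: l).filter pvKept = i :: l.filter pvKept := by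
          simp [pvKept, h]
        rw [hf]
        refine (h1.trans (h2.append_left _)).trans ?_
        simp
      · rw [if_neg h]
        have hf : (i :: l).filter pvKept = l.filter pvKept := by
          simp [pvKept, h]
        rw [hf]
        split_ifs <;> exact ih _ _

theorem pv_sortedA (l : List Char) : ∀ (acc : List Char) (s : Int),
    List.Pairwise pvR acc → List.Pairwise pvR ((l.foldl pvStepA (acc, s)).1) := by
  letI : Std.Total pvR := ⟨fun a b => Nat.le_total a.toNat b.toNat⟩
  letI : IsTrans Char pvR := ⟨fun _ _ _ h1 h2 => Nat.le_trans h1 h2⟩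
  induction l with
  | nil => intro acc s h; exact h
  | cons i l ih =>
      intro acc s h
      simp only [List.foldl_cons, pvStepA]
      split_ifs with h1 h2
      · exact ih _ _ (by rw [pv_insort_eq]; exact h.orderedInsert _ _)
      · exact ih _ _ h
      · exact ih _ _ h

-- final bucket contents: counts[k] = number of chars of ord k+65 in l
theorem pv_countsB (l : List Char) : ∀ (acc : List Nat) (s : Int) (k : Nat),
    acc.length = 58 → k < 58 →
    ((l.foldl pvStepB (acc, s)).1).getD k 0
      = acc.getD k 0 + l.countP (fun c => c.toNat = k + 65) := by
  induction l with
  | nil => intro acc s k _ _; simp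
  | cons i l ih =>
      intro acc s k hlen hk
      simp only [List.foldl_cons, pvStepB]
      by_cases h : 65 ≤ i.toNat ∧ i.toNat ≤ 122
      · rw [if_pos h]
        have hj : i.toNat - 65 < acc.length := by omega
        have hlen' : (acc.set (i.toNat - 65) (acc.getD (i.toNat - 65) 0 + 1)).length = 58 := by
          simp [hlen]
        rw [ih _ s k hlen' hk, List.countP_cons]
        by_cases hek : i.toNat - 65 = k
        · have hc : i.toNat = k + 65 := by omega
          have hset : (acc.set (i.toNat - 65) (acc.getD (i.toNat - 65) 0 + 1)).getD k 0
              = acc.getD k 0 + 1 := by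
            subst hek
            rw [List.getD_eq_getElem?_getD, List.getElem?_set_self hj,
              List.getD_eq_getElem?_getD, List.getElem?_eq_getElem hj]
            simp
          rw [hset, if_pos (by simp [hc])]
          omega
        · have hc : ¬ (i.toNat = k + 65) := by omega
          have hset : (acc.set (i.toNat - 65) (acc.getD (i.toNat - 65) 0 + 1)).getD k 0
              = acc.getD k 0 := by
            rw [List.getD_eq_getElem?_getD, List.getElem?_set_ne hek,
              List.getD_eq_getElem?_getD]
          rw [hset, if_neg (by simp [hc])]
          omega
      · rw [if_neg h]
        have hc : ¬ (i.toNat = k + 65) := by omega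
        have hcp : List.countP (fun c => decide (c.toNat = k + 65)) (i :: l)
            = List.countP (fun c => decide (c.toNat = k + 65)) l := by
          rw [List.countP_cons, if_neg (by simp [hc])]
          omega
        rw [hcp]
        split_ifs with h2
        · exact ih _ _ _ hlen hk
        · exact ih _ _ _ hlen hk

-- the reconstruction loop, abstracted over the count function
def pvBuild (f : Nat → Nat) (n : Nat) : List Char :=
  (List.range n).flatMap (fun k => List.replicate (f k) (Char.ofNat (65 + k)))

theorem pv_toNat_ofNat (n : Nat) (h : n < 123) : (Char.ofNat (65 + n)).toNat = 65 + n := by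
  have hv : (65 + n).isValidChar := Or.inl (by omega)
  simp [Char.ofNat, hv, Char.toNat, Char.ofNatAux]
  omega

theorem pv_build_zero (f : Nat → Nat) : pvBuild f 0 = [] := rfl

theorem pv_build_succ (f : Nat → Nat) (n : Nat) :
    pvBuild f (n + 1) = pvBuild f n ++ List.replicate (f n) (Char.ofNat (65 + n)) := by
  simp [pvBuild, List.range_succ]

theorem pv_build_bound (f : Nat → Nat) (n : Nat) (hn : n ≤ 58) :
    ∀ x ∈ pvBuild f n, x.toNat < 65 + n := by
  induction n with
  | zero => simp [pv_build_zero]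
  | succ n ih =>
      intro x hx
      rw [pv_build_succ] at hx
      rcases List.mem_append.mp hx with hx | hx
      · have := ih (by omega) x hx
        omega
      · rw [List.eq_of_mem_replicate hx, pv_toNat_ofNat n (by omega)]
        omega

theorem pv_build_sorted (f : Nat → Nat) (n : Nat) (hn : n ≤ 58) :
    List.Pairwise pvR (pvBuild f n) := by
  induction n with
  | zero => simp [pv_build_zero]
  | succ n ih =>
      rw [pv_build_succ, List.pairwise_append]
      refine ⟨ih (by omega), ?_, ?_⟩
      · exact List.pairwise_replicate.mpr (Or.inr (Nat.le_refl _))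
      · intro a ha b hb
        have hb' := List.eq_of_mem_replicate hb
        have hlt := pv_build_bound f n (by omega) a ha
        rw [hb']
        show a.toNat ≤ (Char.ofNat (65 + n)).toNat
        rw [pv_toNat_ofNat n (by omega)]
        omega

theorem pv_build_count (f : Nat → Nat) (n : Nat) (hn : n ≤ 58) (x : Char) :
    List.count x (pvBuild f n)
      = if 65 ≤ x.toNat ∧ x.toNat < 65 + n then f (x.toNat - 65) else 0 := by
  induction n with
  | zero => rw [pv_build_zero, if_neg (by omega)]; rfl
  | succ n ih =>
      rw [pv_build_succ, List.count_append, ih (by omega)]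
      by_cases hx : x = Char.ofNat (65 + n)
      · have hxt : x.toNat = 65 + n := by rw [hx, pv_toNat_ofNat n (by omega)]
        rw [if_neg (by omega), if_pos (by omega), List.count_replicate,
          if_pos (by rw [hx]; exact beq_self_eq_true _)]
        have hxn : x.toNat - 65 = n := by omega
        rw [hxn]
        omega
      · have hcr : List.count x (List.replicate (f n) (Char.ofNat (65 + n))) = 0 := by
          rw [List.count_replicate, if_neg (fun h => hx (eq_of_beq h).symm)]
        rw [hcr]
        have hxt : x.toNat ≠ 65 + n := by
          intro he
          exact hx (pv_toNat_inj (by rw [he, pv_toNat_ofNat n (by omega)]))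
        by_cases h1 : 65 ≤ x.toNat ∧ x.toNat < 65 + n
        · rw [if_pos h1, if_pos (by omega)]; simp
        · rw [if_neg h1, if_neg (by omega)]

theorem pv_parts_eq (C : List Nat) :
    (PySem.List.pyRange 65 123 1).foldl
      (fun acc o => acc ++ List.replicate (C.getD (o.toNat - 65) 0) (Char.ofNat o.toNat)) []
      = pvBuild (fun k => C.getD k 0) 58 := by
  rw [PySem.List.foldl_append_eq_flatMap, List.nil_append, PySem.List.pyRange_one,
    List.flatMap_map]
  have hrange : ((123 : Int) - 65).toNat = 58 := by decide
  rw [hrange]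
  unfold pvBuild
  congr 1
  funext k
  have ht : ((65 : Int) + (k : Int)).toNat = 65 + k := by omega
  have h2 : 65 + k - 65 = k := by omega
  rw [ht, h2]

theorem pv_lists_eq (S : String) :
    (S.toList.foldl pvStepA ([], 0)).1
      = pvBuild (fun k => (S.toList.foldl pvStepB (List.replicate 58 0, 0)).1.getD k 0) 58 := by
  letI : Std.Antisymm pvR := ⟨fun _ _ h1 h2 => pv_toNat_inj (Nat.le_antisymm h1 h2)⟩
  have hC_count : ∀ k, k < 58 →
      (S.toList.foldl pvStepB (List.replicate 58 0, 0)).1.getD k 0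
        = S.toList.countP (fun c => c.toNat = k + 65) := by
    intro k hk
    have h0 : (List.replicate 58 (0 : Nat)).getD k 0 = 0 := by
      rw [List.getD_eq_getElem?_getD, List.getElem?_replicate]
      simp [hk]
    have h := pv_countsB S.toList (List.replicate 58 0) 0 k (by simp) hk
    omega
  have hLA : ((S.toList.foldl pvStepA ([], 0)).1).Perm (S.toList.filter pvKept) := by
    have h := pv_permA S.toList [] 0
    simpa using h.trans (by simpa using (List.reverse_perm (S.toList.filter pvKept)))
  have hBperm : (pvBuild (fun k =>
        (S.toList.foldl pvStepB (List.replicate 58 0, 0)).1.getD k 0) 58).Perm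
      (S.toList.filter pvKept) := by
    rw [List.perm_iff_count]
    intro x
    rw [pv_build_count _ _ (Nat.le_refl 58) x]
    by_cases hx : 65 ≤ x.toNat ∧ x.toNat ≤ 122
    · rw [if_pos (by omega), hC_count (x.toNat - 65) (by omega)]
      rw [List.count_filter (by simp [pvKept]; omega)]
      rw [List.count_eq_countP]
      apply List.countP_congr
      intro c _
      simp only [decide_eq_true_eq, beq_iff_eq]
      constructor
      · intro h; exact pv_toNat_inj (by omega)
      · rintro rfl; omega
    · rw [if_neg (by omega)]
      symm
      rw [List.count_eq_zero]
      intro hmem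
      have := (List.mem_filter.mp hmem).2
      simp [pvKept] at this
      omega
  exact List.Perm.eq_of_pairwise'
    (pv_sortedA S.toList [] 0 List.Pairwise.nil)
    (pv_build_sorted _ 58 (Nat.le_refl 58))
    (hLA.trans hBperm.symm)

theorem pv_main (S : String) : rearrange2 S = rearrange2_alt S := by
  unfold rearrange2 rearrange2_alt
  simp only
  rw [pv_sum_eq S.toList [] (List.replicate 58 0) 0, pv_parts_eq, pv_lists_eq]

-- ===== VERDICT (by name: the statement is the Claim_ definition above) =====
theorem rearrange2_spec : Claim_equal_rearrange2 := by
  intro S _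
  unfold Spec_rearrange2
  exact pv_main S
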